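-- pv_equiv track=rewrite | github.com/greengreengreen/data_structure_n_algos | next_greater/next_greater.py | v2_adv
-- ===== SOURCE A (Python) =====
-- def v2_adv(A):
--     arr = sorted([(num, i) for i, num in enumerate(A)])
--     n = len(A)
--     res = [-1] * n
--     stack = []
--     for num, j in arr:
--         while stack and stack[-1] < j:
--             res[stack.pop()] = j
--         stack.append(j)
--     return res
-- ===== SOURCE B (Python) =====
-- def v2_adv(A):
--     n = len(A)
--     res = []
--     for i in range(n):
--         best = None
--         for j in range(i + 1, n):
--             if A[j] >= A[i] and (best is None or A[j] < A[best]):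
--                 best = j
--         res.append(best if best is not None else -1)
--     return res
-- ===== Notes on version B (the rewrite author's own statement) =====
-- stated objective: simpler
-- what changed: Replaced the sort-then-monotonic-stack pass with a direct nested scan that, for each index i, tracks the right-neighbour j > i with A[j] >= A[i] minimizing (A[j], j).
import Mathlib
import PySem

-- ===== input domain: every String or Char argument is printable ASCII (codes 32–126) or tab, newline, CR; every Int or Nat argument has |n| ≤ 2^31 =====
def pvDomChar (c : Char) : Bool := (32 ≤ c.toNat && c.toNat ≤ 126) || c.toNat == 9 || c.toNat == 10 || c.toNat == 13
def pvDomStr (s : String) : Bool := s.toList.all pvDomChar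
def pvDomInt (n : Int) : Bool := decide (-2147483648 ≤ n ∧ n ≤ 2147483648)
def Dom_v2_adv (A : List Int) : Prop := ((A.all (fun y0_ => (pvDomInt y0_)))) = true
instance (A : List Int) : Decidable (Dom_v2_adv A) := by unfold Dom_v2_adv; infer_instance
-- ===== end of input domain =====

-- B replaces A's sort-plus-monotonic-stack pass by a direct nested scan tracking, for each i,
-- the j > i with A[j] >= A[i] minimizing (A[j], j); objective: simpler.

-- ===== PORT A =====
-- the Python stack (append/pop at the right end) is represented head-first: head = top of stack
def pvPops (res : List Int) (stack : List Int) (j : Int) : List Int × List Int :=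
  match stack with
  | [] => (res, [])
  | s :: rest => if s < j then pvPops (PySem.List.pySetD res s j) rest j else (res, s :: rest)

def v2_adv (A : List Int) : List Int :=
  let arr := PySem.List.sorted2 ((PySem.List.enumerate A).map (fun p => (p.2, p.1)))
      (fun q => q.1) (fun q => q.2)
  let n := A.length
  let res := List.replicate n (-1 : Int)
  (arr.foldl (fun st p =>
      let r := pvPops st.1 st.2 p.2
      (r.1, p.2 :: r.2)) (res, ([] : List Int))).1

-- ===== PORT B =====
def pvBest (A : List Int) (i : Int) : Option Int :=
  (PySem.List.pyRange (i + 1) (A.length : Int) 1).foldl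
    (fun best j =>
      if decide (PySem.List.pyGetD A i 0 ≤ PySem.List.pyGetD A j 0) &&
         (match best with
          | none => true
          | some b => decide (PySem.List.pyGetD A j 0 < PySem.List.pyGetD A b 0))
      then some j else best) none

def v2_adv_alt (A : List Int) : List Int :=
  (PySem.List.pyRange 0 (A.length : Int) 1).map (fun i =>
    match pvBest A i with
    | some b => b
    | none => -1)

-- ===== PRECONDITION & SPEC =====
def Spec_v2_adv (A : List Int) (out : List Int) : Prop := out = v2_adv_alt A
instance (A : List Int) (out : List Int) : Decidable (Spec_v2_adv A out) := by unfold Spec_v2_adv; infer_instance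

-- ===== CLAIM (what is proved, stated in full; the proofs are below) =====
def Claim_equal_v2_adv : Prop := ∀ (A : List Int), Dom_v2_adv A → Spec_v2_adv A (v2_adv A)

-- ===== LEMMAS AND PROOFS =====

-- Python's lexicographic strict order on (value, index) pairs
def pvLtP (p q : Int × Int) : Prop := p.1 < q.1 ∨ (p.1 = q.1 ∧ p.2 < q.2)

theorem pvLtP_trans {p q r : Int × Int} (h1 : pvLtP p q) (h2 : pvLtP q r) : pvLtP p r := by
  unfold pvLtP at *; omega

theorem pvLtP_irrefl (p : Int × Int) : ¬ pvLtP p p := by unfold pvLtP; omega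

theorem pvLtP_asymm {p q : Int × Int} (h : pvLtP p q) : ¬ pvLtP q p := by
  unfold pvLtP at *; omega

-- the Boolean comparison sorted2 uses, and its meaning
theorem pvBefore_iff (p q : Int × Int) :
    ((decide (p.1 < q.1) || (!decide (q.1 < p.1) && decide (p.2 < q.2))) = true) ↔ pvLtP p q := by
  unfold pvLtP; simp; omega

theorem pvInsertBy_pairwise (x : Int × Int) (ys : List (Int × Int))
    (h : ys.Pairwise (fun u v => ¬ pvLtP v u)) :
    (PySem.List.insertBy
      (fun a b => decide (a.1 < b.1) || (!decide (b.1 < a.1) && decide (a.2 < b.2))) x ys).Pairwise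
      (fun u v => ¬ pvLtP v u) := by
  induction ys with
  | nil => simp [PySem.List.insertBy]
  | cons y ys ih =>
    rw [List.pairwise_cons] at h
    obtain ⟨h1, h2⟩ := h
    simp only [PySem.List.insertBy]
    by_cases hb : (decide (x.1 < y.1) || (!decide (y.1 < x.1) && decide (x.2 < y.2))) = true
    · rw [if_pos hb]
      have hxy : pvLtP x y := (pvBefore_iff x y).mp hb
      refine List.Pairwise.cons ?_ (List.Pairwise.cons h1 h2)
      intro v hv
      rcases List.mem_cons.mp hv with rfl | hv
      · exact pvLtP_asymm hxy
      · intro hvx; exact h1 v hv (pvLtP_trans hvx hxy)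
    · rw [if_neg hb]
      refine List.Pairwise.cons ?_ (ih h2)
      intro v hv
      rcases (PySem.List.mem_insertBy _ _ _ _).mp hv with rfl | hv
      · intro hxy; exact hb ((pvBefore_iff v y).mpr hxy)
      · exact h1 v hv


theorem pvFoldlInsert_pairwise (l : List (Int × Int)) (acc : List (Int × Int))
    (h : acc.Pairwise (fun u v => ¬ pvLtP v u)) :
    (l.foldl (fun acc x => PySem.List.insertBy
      (fun a b => decide (a.1 < b.1) || (!decide (b.1 < a.1) && decide (a.2 < b.2))) x acc) acc).Pairwise
      (fun u v => ¬ pvLtP v u) := by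
  induction l generalizing acc with
  | nil => exact h
  | cons p l ih => exact ih _ (pvInsertBy_pairwise p acc h)


-- abbreviations for the A-side data
def pvPairs (A : List Int) : List (Int × Int) := (PySem.List.enumerate A).map (fun p => (p.2, p.1))

def pvArr (A : List Int) : List (Int × Int) :=
  PySem.List.sorted2 (pvPairs A) (fun q => q.1) (fun q => q.2)

theorem pvArr_perm (A : List Int) : (pvArr A).Perm (pvPairs A) :=
  PySem.List.sorted2_perm _ _ _ _

theorem pvArr_pairwise_le (A : List Int) : (pvArr A).Pairwise (fun u v => ¬ pvLtP v u) := by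
  show (PySem.List.sorted2 (pvPairs A) (fun q => q.1) (fun q => q.2)).Pairwise _
  simp only [PySem.List.sorted2]
  exact pvFoldlInsert_pairwise (pvPairs A) [] (by simp)


theorem pvPairs_map_snd (A : List Int) :
    (pvPairs A).map (·.2) = PySem.List.pyRange 0 (A.length : Int) 1 := by
  unfold pvPairs
  rw [List.map_map]
  have : ((fun x : Int × Int => x.2) ∘ fun p : Int × Int => (p.2, p.1)) = (fun p : Int × Int => p.1) := rfl
  rw [this, PySem.List.map_fst_enumerate]
  norm_num


theorem pvMem_enum (A : List Int) (s : Int) (r : Int × Int) :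
    r ∈ (PySem.List.enumerate A s).map (fun p => (p.2, p.1)) ↔
      ∃ m : Nat, m < A.length ∧ r = (A.getD m 0, s + (m : Int)) := by
  induction A generalizing s with
  | nil => simp [PySem.List.enumerate_nil]
  | cons a t ih =>
    rw [PySem.List.enumerate_cons]
    simp only [List.map_cons, List.mem_cons, ih]
    constructor
    · rintro (rfl | ⟨m, hm, rfl⟩)
      · exact ⟨0, by simp⟩
      · exact ⟨m + 1, by simpa using hm, by simp; ring⟩
    · rintro ⟨m, hm, rfl⟩
      cases m with
      | zero => left; simp
      | succ m => right; exact ⟨m, by simpa using hm, by simp; ring⟩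

theorem pvMem_pairs (A : List Int) (r : Int × Int) :
    r ∈ pvPairs A ↔ ∃ m : Nat, m < A.length ∧ r = (A.getD m 0, (m : Int)) := by
  have := pvMem_enum A 0 r
  simpa [pvPairs] using this


theorem pvArr_snd_nodup (A : List Int) : ((pvArr A).map (·.2)).Nodup := by
  have hperm : ((pvArr A).map (·.2)).Perm ((pvPairs A).map (·.2)) := (pvArr_perm A).map _
  rw [hperm.nodup_iff, pvPairs_map_snd]
  exact PySem.List.nodup_pyRange_one 0 (A.length : Int)


theorem pvMem_arr (A : List Int) (r : Int × Int) :
    r ∈ pvArr A ↔ ∃ m : Nat, m < A.length ∧ r = (A.getD m 0, (m : Int)) := by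
  rw [(pvArr_perm A).mem_iff]
  exact pvMem_pairs A r


theorem pvArr_pairwise (A : List Int) : (pvArr A).Pairwise pvLtP := by
  have h1 := pvArr_pairwise_le A
  have h2 : (pvArr A).Pairwise (fun u v : Int × Int => u.2 ≠ v.2) := by
    have := pvArr_snd_nodup A
    rw [List.nodup_iff_pairwise_ne] at this
    exact List.pairwise_map.mp this
  refine (h1.and h2).imp ?_
  intro u v hv
  unfold pvLtP at *
  omega


-- the run of A's main loop, and auxiliary descriptions of its effect
def pvRun (ps : List (Int × Int)) (st : List Int × List Int) : List Int × List Int :=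
  ps.foldl (fun st p =>
      let r := pvPops st.1 st.2 p.2
      (r.1, p.2 :: r.2)) st

def pvWriteAll (res : List Int) (l : List Int) (j : Int) : List Int :=
  l.foldl (fun r s => PySem.List.pySetD r s j) res

def pvNxt (ps : List (Int × Int)) (k : Int) : Option (Int × Int) :=
  ps.find? (fun p => decide (k < p.2))

def pvSuffAfter (ps : List (Int × Int)) (k : Int) : List (Int × Int) :=
  match ps with
  | [] => []
  | p :: t => if p.2 = k then t else pvSuffAfter t k

theorem pvPops_eq (res stack : List Int) (j : Int) :
    pvPops res stack j =
      (pvWriteAll res (stack.takeWhile (fun s => decide (s < j))) j,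
       stack.dropWhile (fun s => decide (s < j))) := by
  induction stack generalizing res with
  | nil => simp [pvPops, pvWriteAll]
  | cons s rest ih =>
    by_cases h : s < j
    · rw [List.takeWhile_cons_of_pos (by simpa using h), List.dropWhile_cons_of_pos (by simpa using h)]
      simp only [pvPops, if_pos h]
      rw [ih]
      rfl
    · rw [List.takeWhile_cons_of_neg (by simpa using h), List.dropWhile_cons_of_neg (by simpa using h)]
      simp [pvPops, if_neg h, pvWriteAll]


theorem pvWriteAll_length (res l : List Int) (j : Int) :
    (pvWriteAll res l j).length = res.length := by
  induction l generalizing res with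
  | nil => rfl
  | cons s rest ih =>
    show (pvWriteAll (PySem.List.pySetD res s j) rest j).length = _
    rw [ih, PySem.List.length_pySetD]


theorem pvWriteAll_getElem? (res l : List Int) (j : Int) (k : Nat)
    (hnn : ∀ s ∈ l, 0 ≤ s) :
    (pvWriteAll res l j)[k]? = if (k : Int) ∈ l ∧ k < res.length then some j else res[k]? := by
  induction l generalizing res with
  | nil => simp [pvWriteAll]
  | cons s rest ih =>
    have hs : 0 ≤ s := hnn s (List.mem_cons_self ..)
    show (pvWriteAll (PySem.List.pySetD res s j) rest j)[k]? = _
    rw [ih _ (fun x hx => hnn x (List.mem_cons_of_mem _ hx))]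
    rw [PySem.List.pySetD_of_nonneg _ _ hs, List.length_set, List.getElem?_set]
    by_cases hk : (k : Int) ∈ rest
    · by_cases hlen : k < res.length
      · simp [hk, hlen]
      · simp [hk, hlen]
        intro h
        omega
    · by_cases hks : (k : Int) = s
      · have hkeq : s.toNat = k := by omega
        by_cases hlen : k < res.length
        · simp [hks, hkeq, hlen]
        · simp [hks, hkeq, hlen]
      · have : s.toNat ≠ k := by omega
        simp [hk, hks, this]


theorem pvMem_dropWhile (stack : List Int) (j : Int) (hst : stack.Pairwise (· < ·)) :
    ∀ s ∈ stack.dropWhile (fun s => decide (s < j)), ¬ s < j := by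
  induction stack with
  | nil => simp
  | cons a rest ih =>
    rw [List.pairwise_cons] at hst
    by_cases ha : a < j
    · rw [List.dropWhile_cons_of_pos (by simpa using ha)]
      exact ih hst.2
    · rw [List.dropWhile_cons_of_neg (by simpa using ha)]
      intro s hs
      rcases List.mem_cons.mp hs with rfl | hs
      · exact ha
      · have := hst.1 s hs
        omega

theorem pvRun_char (ps : List (Int × Int)) (res stack : List Int)
    (hst : stack.Pairwise (· < ·))
    (hstnn : ∀ s ∈ stack, 0 ≤ s)
    (hstb : ∀ s ∈ stack, s < (res.length : Int))
    (hpsnn : ∀ p ∈ ps, 0 ≤ p.2)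
    (hpsb : ∀ p ∈ ps, p.2 < (res.length : Int))
    (hnd : (stack ++ ps.map (·.2)).Nodup) :
    ∀ k : Nat,
      ((pvRun ps (res, stack)).1)[k]? =
        if (k : Int) ∈ stack then
          (match pvNxt ps (k : Int) with
           | some p => some p.2
           | none => res[k]?)
        else if (k : Int) ∈ ps.map (·.2) then
          (match pvNxt (pvSuffAfter ps (k : Int)) (k : Int) with
           | some p => some p.2
           | none => res[k]?)
        else res[k]? := by
  induction ps generalizing res stack with
  | nil =>
    intro k
    simp only [pvRun, List.foldl_nil, pvNxt, pvSuffAfter, List.find?_nil, List.map_nil,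
      List.not_mem_nil, if_false]
    split_ifs <;> rfl
  | cons p rest ih =>
    intro k
    have hj0 : 0 ≤ p.2 := hpsnn p (List.mem_cons_self ..)
    have hjb : p.2 < (res.length : Int) := hpsb p (List.mem_cons_self ..)
    rw [List.map_cons] at hnd
    rw [List.nodup_append] at hnd
    obtain ⟨hstack_nd, hcons_nd, hdisj⟩ := hnd
    rw [List.nodup_cons] at hcons_nd
    obtain ⟨hpnotrest, hrest_nd⟩ := hcons_nd
    have hpstack : p.2 ∉ stack := fun h => hdisj p.2 h p.2 (List.mem_cons_self ..) rfl
    -- the step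
    set T := stack.takeWhile (fun s => decide (s < p.2)) with hTdef
    set D := stack.dropWhile (fun s => decide (s < p.2)) with hDdef
    have hTD : T ++ D = stack := List.takeWhile_append_dropWhile
    have hTsub : T.Sublist stack := by rw [← hTD]; exact List.sublist_append_left T D
    have hDsub : D.Sublist stack := by rw [← hTD]; exact List.sublist_append_right T D
    have hmemTD : ∀ x : Int, x ∈ stack ↔ x ∈ T ∨ x ∈ D := by
      intro x; rw [← hTD, List.mem_append]
    have hT : ∀ x ∈ T, x < p.2 := by
      intro x hx; simpa using List.mem_takeWhile_imp hx
    have hD : ∀ x ∈ D, ¬ x < p.2 := pvMem_dropWhile stack p.2 hst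
    set W := pvWriteAll res T p.2 with hWdef
    have hWlen : W.length = res.length := pvWriteAll_length res T p.2
    have hstep : pvRun (p :: rest) (res, stack) = pvRun rest (W, p.2 :: D) := by
      simp only [pvRun, List.foldl_cons]
      rw [pvPops_eq]
    have hWk : ∀ kk : Nat, W[kk]? = if (kk : Int) ∈ T ∧ kk < res.length then some p.2 else res[kk]? :=
      fun kk => pvWriteAll_getElem? res T p.2 kk (fun s hs => hstnn s (hTsub.subset hs))
    -- IH hypotheses for the new state
    have hst' : (p.2 :: D).Pairwise (· < ·) := by
      rw [List.pairwise_cons]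
      refine ⟨?_, hst.sublist hDsub⟩
      intro x hx
      have h1 := hD x hx
      have h2 : x ≠ p.2 := fun h => hpstack (h ▸ hDsub.subset hx)
      omega
    have hnd' : ((p.2 :: D) ++ rest.map (·.2)).Nodup := by
      rw [List.cons_append, List.nodup_cons, List.nodup_append]
      refine ⟨?_, (hstack_nd.sublist hDsub), hrest_nd, ?_⟩
      · rw [List.mem_append]
        rintro (h | h)
        · exact hpstack (hDsub.subset h)
        · exact hpnotrest h
      · intro x hx y hy
        exact hdisj x (hDsub.subset hx) y (List.mem_cons_of_mem _ hy)
    have E := ih W (p.2 :: D) hst'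
      (by
        intro s hs
        rcases List.mem_cons.mp hs with rfl | hs
        · exact hj0
        · exact hstnn s (hDsub.subset hs))
      (by
        rw [hWlen]
        intro s hs
        rcases List.mem_cons.mp hs with rfl | hs
        · exact hjb
        · exact hstb s (hDsub.subset hs))
      (fun q hq => hpsnn q (List.mem_cons_of_mem _ hq))
      (by rw [hWlen]; exact fun q hq => hpsb q (List.mem_cons_of_mem _ hq))
      hnd' k
    rw [hstep, E]
    -- case analysis on k
    by_cases hks : (k : Int) ∈ stack
    · have hkne : (k : Int) ∉ rest.map (·.2) := fun h => hdisj _ hks _ (List.mem_cons_of_mem _ h) rfl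
      by_cases hkj : (k : Int) < p.2
      · -- popped now
        have hkT : (k : Int) ∈ T := by
          rcases (hmemTD _).mp hks with h | h
          · exact h
          · exact absurd hkj (hD _ h)
        have hknotnew : (k : Int) ∉ p.2 :: D := by
          intro h
          rcases List.mem_cons.mp h with h | h
          · omega
          · exact (hD _ h) hkj
        have hklen : k < res.length := by
          have := hstb _ hks; omega
        rw [if_neg hknotnew, if_neg hkne, hWk k, if_pos ⟨hkT, hklen⟩, if_pos hks]
        have : pvNxt (p :: rest) (k : Int) = some p := by
          simp [pvNxt, List.find?_cons_of_pos, hkj]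
        rw [this]
      · -- stays on the stack
        have hkD : (k : Int) ∈ D := by
          rcases (hmemTD _).mp hks with h | h
          · exact absurd (hT _ h) hkj
          · exact h
        have hkT : (k : Int) ∉ T := fun h => hkj (hT _ h)
        rw [if_pos (List.mem_cons_of_mem _ hkD), if_pos hks]
        have hnx : pvNxt (p :: rest) (k : Int) = pvNxt rest (k : Int) := by
          simp [pvNxt, List.find?_cons_of_neg, hkj]
        rw [hnx, hWk k, if_neg (by simp [hkT])]
    · by_cases hkp : (k : Int) = p.2
      · -- k is the new pair's index
        rw [if_pos (by rw [hkp]; exact List.mem_cons_self ..), if_neg hks,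
          if_pos (by rw [List.map_cons]; exact List.mem_cons.mpr (Or.inl hkp))]
        have hsuff : pvSuffAfter (p :: rest) (k : Int) = rest := by
          simp [pvSuffAfter, hkp.symm]
        rw [hsuff]
        have hkT : (k : Int) ∉ T := fun h => hks (hTsub.subset h)
        rw [hWk k, if_neg (by simp [hkT])]
      · have hknotnew : (k : Int) ∉ p.2 :: D := by
          intro h
          rcases List.mem_cons.mp h with h | h
          · exact hkp h
          · exact hks (hDsub.subset h)
        have hkT : (k : Int) ∉ T := fun h => hks (hTsub.subset h)
        have hWk' : W[k]? = res[k]? := by rw [hWk k]; simp [hkT]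
        rw [if_neg hknotnew, if_neg hks]
        by_cases hkr : (k : Int) ∈ rest.map (·.2)
        · rw [if_pos hkr,
            if_pos (show (k : Int) ∈ (p :: rest).map (·.2) by
              rw [List.map_cons]; exact List.mem_cons_of_mem _ hkr)]
          have hsuff : pvSuffAfter (p :: rest) (k : Int) = pvSuffAfter rest (k : Int) := by
            simp only [pvSuffAfter]
            rw [if_neg (fun h => hkp (Eq.symm h))]
          rw [hsuff, hWk']
        · rw [if_neg hkr,
            if_neg (show ¬ (k : Int) ∈ (p :: rest).map (·.2) by
              rw [List.map_cons, List.mem_cons]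
              rintro (h | h)
              · exact hkp h
              · exact hkr h), hWk']
theorem pvSuffAfter_mem (ps : List (Int × Int)) (k : Int) (q0 : Int × Int)
    (hpw : ps.Pairwise pvLtP) (hnd : (ps.map (·.2)).Nodup)
    (hq0 : q0 ∈ ps) (hk : q0.2 = k) (r : Int × Int) :
    r ∈ pvSuffAfter ps k ↔ r ∈ ps ∧ pvLtP q0 r := by
  induction ps with
  | nil => simp at hq0
  | cons p t ih =>
    rw [List.pairwise_cons] at hpw
    obtain ⟨hp1, hp2⟩ := hpw
    by_cases hpk : p.2 = k
    · have hq0p : q0 = p := by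
        rcases List.mem_cons.mp hq0 with rfl | hq0t
        · rfl
        · exfalso
          rw [List.map_cons, List.nodup_cons] at hnd
          exact hnd.1 (by rw [hpk, ← hk]; exact List.mem_map_of_mem hq0t)
      subst hq0p
      simp only [pvSuffAfter, if_pos hpk]
      constructor
      · intro hr
        exact ⟨List.mem_cons_of_mem _ hr, hp1 r hr⟩
      · rintro ⟨hr, hlt⟩
        rcases List.mem_cons.mp hr with rfl | hrt
        · exact absurd hlt (pvLtP_irrefl r)
        · exact hrt
    · have hq0t : q0 ∈ t := by
        rcases List.mem_cons.mp hq0 with rfl | h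
        · exact absurd hk hpk
        · exact h
      simp only [pvSuffAfter, if_neg hpk]
      rw [ih hp2 (by rw [List.map_cons, List.nodup_cons] at hnd; exact hnd.2) hq0t]
      constructor
      · rintro ⟨hr, hlt⟩; exact ⟨List.mem_cons_of_mem _ hr, hlt⟩
      · rintro ⟨hr, hlt⟩
        rcases List.mem_cons.mp hr with rfl | hrt
        · exact absurd hlt (pvLtP_asymm (hp1 q0 hq0t))
        · exact ⟨hrt, hlt⟩


theorem pvSuffAfter_pairwise (ps : List (Int × Int)) (k : Int) (hpw : ps.Pairwise pvLtP) :
    (pvSuffAfter ps k).Pairwise pvLtP := by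
  induction ps with
  | nil => exact List.Pairwise.nil
  | cons p t ih =>
    rw [List.pairwise_cons] at hpw
    by_cases hpk : p.2 = k
    · simpa [pvSuffAfter, if_pos hpk] using hpw.2
    · simpa [pvSuffAfter, if_neg hpk] using ih hpw.2


theorem pvNxt_eq_some (l : List (Int × Int)) (k : Int) (q : Int × Int)
    (hpw : l.Pairwise pvLtP) (h : pvNxt l k = some q) :
    q ∈ l ∧ k < q.2 ∧ ∀ r ∈ l, k < r.2 → q = r ∨ pvLtP q r := by
  induction l with
  | nil => simp [pvNxt] at h
  | cons p t ih =>
    rw [List.pairwise_cons] at hpw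
    by_cases hkp : k < p.2
    · have : pvNxt (p :: t) k = some p := by simp [pvNxt, List.find?_cons_of_pos, hkp]
      rw [this] at h
      obtain rfl := Option.some.injEq .. ▸ h
      refine ⟨List.mem_cons_self .., hkp, ?_⟩
      intro r hr _
      rcases List.mem_cons.mp hr with rfl | hrt
      · exact Or.inl rfl
      · exact Or.inr (hpw.1 r hrt)
    · have : pvNxt (p :: t) k = pvNxt t k := by simp [pvNxt, List.find?_cons_of_neg, hkp]
      rw [this] at h
      obtain ⟨h1, h2, h3⟩ := ih hpw.2 h
      refine ⟨List.mem_cons_of_mem _ h1, h2, ?_⟩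
      intro r hr hkr
      rcases List.mem_cons.mp hr with rfl | hrt
      · exact absurd hkr hkp
      · exact h3 r hrt hkr


theorem pvNxt_eq_none (l : List (Int × Int)) (k : Int) :
    pvNxt l k = none ↔ ∀ r ∈ l, ¬ k < r.2 := by
  rw [pvNxt, List.find?_eq_none]
  simp


def pvStep (A : List Int) (i : Int) : Option Int → Int → Option Int :=
  fun best j =>
      if decide (PySem.List.pyGetD A i 0 ≤ PySem.List.pyGetD A j 0) &&
         (match best with
          | none => true
          | some b => decide (PySem.List.pyGetD A j 0 < PySem.List.pyGetD A b 0))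
      then some j else best

theorem pvBest_eq (A : List Int) (i : Int) :
    pvBest A i = (PySem.List.pyRange (i + 1) (A.length : Int) 1).foldl (pvStep A i) none := rfl

theorem pvBestAux (A : List Int) (k : Nat) (m : Nat) (hm1 : k + 1 ≤ m) (hm2 : m ≤ A.length) :
    ((PySem.List.pyRange ((k : Int) + 1) (m : Int) 1).foldl (pvStep A (k : Int)) none = none ↔
       ∀ j : Nat, k < j → j < m → ¬ A.getD k 0 ≤ A.getD j 0) ∧
    (∀ b : Int, (PySem.List.pyRange ((k : Int) + 1) (m : Int) 1).foldl (pvStep A (k : Int)) none = some b →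
       ∃ bb : Nat, b = (bb : Int) ∧ k < bb ∧ bb < m ∧ A.getD k 0 ≤ A.getD bb 0 ∧
         ∀ j : Nat, k < j → j < m → A.getD k 0 ≤ A.getD j 0 →
           (A.getD bb 0 < A.getD j 0 ∨ (A.getD bb 0 = A.getD j 0 ∧ bb ≤ j))) := by
  induction m, hm1 using Nat.le_induction with
  | base =>
    rw [PySem.List.pyRange_one_eq_nil (by push_cast; omega)]
    constructor
    · constructor
      · intro _ j h1 h2; omega
      · intro _; rfl
    · intro b hb; simp at hb
  | succ m hm ih =>
    have hmlen : m < A.length := by omega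
    have hcast : (((m + 1 : Nat) : Int)) = (m : Int) + 1 := by push_cast; ring
    rw [hcast, PySem.List.pyRange_one_succ_right (by omega), List.foldl_append,
      List.foldl_cons, List.foldl_nil]
    obtain ⟨ih1, ih2⟩ := ih (by omega)
    cases hFe : (PySem.List.pyRange ((k : Int) + 1) (m : Int) 1).foldl (pvStep A (k : Int)) none with
    | none =>
      have hnone := ih1.mp hFe
      by_cases hc : A.getD k 0 ≤ A.getD m 0
      · have hs : pvStep A (k : Int) none (m : Int) = some (m : Int) := by
          simp only [pvStep, PySem.List.pyGetD_natCast]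
          rw [decide_eq_true hc]
          simp
        rw [hs]
        constructor
        · constructor
          · intro h; simp at h
          · intro hall; exact absurd hc (hall m (by omega) (by omega))
        · intro b hb
          obtain rfl : (m : Int) = b := by simpa using hb
          refine ⟨m, rfl, by omega, by omega, hc, ?_⟩
          intro j h1 h2 h3
          by_cases hjm : j = m
          · subst hjm; exact Or.inr ⟨rfl, le_refl _⟩
          · exact absurd h3 (hnone j h1 (by omega))
      · have hs : pvStep A (k : Int) none (m : Int) = none := by
          simp only [pvStep, PySem.List.pyGetD_natCast]
          rw [decide_eq_false hc]
          simp
        rw [hs]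
        constructor
        · constructor
          · intro _ j h1 h2
            by_cases hjm : j = m
            · subst hjm; exact hc
            · exact hnone j h1 (by omega)
          · intro _; rfl
        · intro b hb; simp at hb
    | some b0 =>
      obtain ⟨bb, rfl, hkb, hbm, hcb, hmin⟩ := ih2 b0 hFe
      have hnotnone : ¬ (∀ j : Nat, k < j → j < m + 1 → ¬ A.getD k 0 ≤ A.getD j 0) :=
        fun hall => hall bb hkb (by omega) hcb
      by_cases hc : A.getD k 0 ≤ A.getD m 0
      · by_cases hlt : A.getD m 0 < A.getD bb 0
        · have hs : pvStep A (k : Int) (some (bb : Int)) (m : Int) = some (m : Int) := by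
            simp only [pvStep, PySem.List.pyGetD_natCast]
            rw [decide_eq_true hc, decide_eq_true hlt]
            simp
          rw [hs]
          constructor
          · constructor
            · intro h; simp at h
            · intro hall; exact absurd hall hnotnone
          · intro b hb
            obtain rfl : (m : Int) = b := by simpa using hb
            refine ⟨m, rfl, by omega, by omega, hc, ?_⟩
            intro j h1 h2 h3
            by_cases hjm : j = m
            · subst hjm; exact Or.inr ⟨rfl, le_refl _⟩
            · have := hmin j h1 (by omega) h3
              left; omega
        · have hs : pvStep A (k : Int) (some (bb : Int)) (m : Int) = some (bb : Int) := by
            simp only [pvStep, PySem.List.pyGetD_natCast]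
            rw [decide_eq_true hc, decide_eq_false hlt]
            simp
          rw [hs]
          constructor
          · constructor
            · intro h; simp at h
            · intro hall; exact absurd hall hnotnone
          · intro b hb
            obtain rfl : ((bb : Int)) = b := by simpa using hb
            refine ⟨bb, rfl, hkb, by omega, hcb, ?_⟩
            intro j h1 h2 h3
            by_cases hjm : j = m
            · subst hjm
              by_cases heq : A.getD bb 0 = A.getD j 0
              · exact Or.inr ⟨heq, by omega⟩
              · left; omega
            · exact hmin j h1 (by omega) h3
      · have hs : pvStep A (k : Int) (some (bb : Int)) (m : Int) = some (bb : Int) := by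
          simp only [pvStep, PySem.List.pyGetD_natCast]
          rw [decide_eq_false hc]
          simp
        rw [hs]
        constructor
        · constructor
          · intro h; simp at h
          · intro hall; exact absurd hall hnotnone
        · intro b hb
          obtain rfl : ((bb : Int)) = b := by simpa using hb
          refine ⟨bb, rfl, hkb, by omega, hcb, ?_⟩
          intro j h1 h2 h3
          by_cases hjm : j = m
          · subst hjm; exact absurd h3 hc
          · exact hmin j h1 (by omega) h3

-- B-side characterization of the inner scan
theorem pvBest_char (A : List Int) (k : Nat) (hk : k < A.length) :
    (pvBest A (k : Int) = none ↔
        ∀ j : Nat, k < j → j < A.length → ¬ A.getD k 0 ≤ A.getD j 0) ∧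
    (∀ b : Int, pvBest A (k : Int) = some b →
        ∃ bb : Nat, b = (bb : Int) ∧ k < bb ∧ bb < A.length ∧ A.getD k 0 ≤ A.getD bb 0 ∧
          ∀ j : Nat, k < j → j < A.length → A.getD k 0 ≤ A.getD j 0 →
            (A.getD bb 0 < A.getD j 0 ∨ (A.getD bb 0 = A.getD j 0 ∧ bb ≤ j))) := by
  rw [pvBest_eq]
  exact pvBestAux A k A.length hk (le_refl _)


-- the two sides agree at every position
theorem pvPointwise (A : List Int) (k : Nat) :
    (v2_adv A)[k]? = (v2_adv_alt A)[k]? := by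
  have hpsnn : ∀ p ∈ pvArr A, 0 ≤ p.2 := by
    intro p hp
    obtain ⟨m, hm, rfl⟩ := (pvMem_arr A p).mp hp
    positivity
  have hpsb : ∀ p ∈ pvArr A, p.2 < ((List.replicate A.length (-1 : Int)).length : Int) := by
    intro p hp
    obtain ⟨m, hm, rfl⟩ := (pvMem_arr A p).mp hp
    rw [List.length_replicate]
    show ((m : Int)) < (A.length : Int)
    exact_mod_cast hm
  have hchar := pvRun_char (pvArr A) (List.replicate A.length (-1)) []
    List.Pairwise.nil (by simp) (by simp) hpsnn hpsb
    (by simpa using pvArr_snd_nodup A) k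
  have hmem : ∀ kk : Nat, ((kk : Int) ∈ (pvArr A).map (·.2)) ↔ kk < A.length := by
    intro kk
    constructor
    · intro h
      obtain ⟨p, hp, hpk⟩ := List.mem_map.mp h
      obtain ⟨m, hm, rfl⟩ := (pvMem_arr A p).mp hp
      have hpk' : (m : Int) = (kk : Int) := hpk
      have : m = kk := by exact_mod_cast hpk'
      omega
    · intro h
      exact List.mem_map.mpr ⟨(A.getD kk 0, (kk : Int)), (pvMem_arr A _).mpr ⟨kk, h, rfl⟩, rfl⟩
  have hAdef : v2_adv A = (pvRun (pvArr A) (List.replicate A.length (-1), [])).1 := rfl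
  rw [hAdef, hchar, if_neg (List.not_mem_nil)]
  by_cases hk : k < A.length
  · -- in range
    rw [if_pos ((hmem k).mpr hk)]
    have hBside : (v2_adv_alt A)[k]? =
        some (match pvBest A (k : Int) with | some b => b | none => -1) := by
      unfold v2_adv_alt
      exact PySem.List.getElem?_map_pyRange_zero _ _ _ hk
    rw [hBside]
    have hq0 : (A.getD k 0, (k : Int)) ∈ pvArr A := (pvMem_arr A _).mpr ⟨k, hk, rfl⟩
    have hsuffmem := pvSuffAfter_mem (pvArr A) (k : Int) (A.getD k 0, (k : Int))
      (pvArr_pairwise A) (pvArr_snd_nodup A) hq0 rfl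
    have hsuffpw := pvSuffAfter_pairwise (pvArr A) (k : Int) (pvArr_pairwise A)
    have hcand : ∀ j : Nat, k < j → j < A.length → A.getD k 0 ≤ A.getD j 0 →
        (A.getD j 0, (j : Int)) ∈ pvSuffAfter (pvArr A) (k : Int) := by
      intro j h1 h2 h3
      refine (hsuffmem _).mpr ⟨(pvMem_arr A _).mpr ⟨j, h2, rfl⟩, ?_⟩
      unfold pvLtP
      simp only
      omega
    have hmemcand : ∀ r ∈ pvSuffAfter (pvArr A) (k : Int), (k : Int) < r.2 →
        ∃ j : Nat, r = (A.getD j 0, (j : Int)) ∧ k < j ∧ j < A.length ∧ A.getD k 0 ≤ A.getD j 0 := by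
      intro r hr hlt
      obtain ⟨hra, hltp⟩ := (hsuffmem r).mp hr
      obtain ⟨m, hm, rfl⟩ := (pvMem_arr A r).mp hra
      unfold pvLtP at hltp
      simp only at hltp hlt
      refine ⟨m, rfl, by exact_mod_cast hlt, hm, by omega⟩
    cases hnx : pvNxt (pvSuffAfter (pvArr A) (k : Int)) (k : Int) with
    | none =>
      have hno := (pvNxt_eq_none _ _).mp hnx
      have hbnone : pvBest A (k : Int) = none :=
        (pvBest_char A k hk).1.mpr (fun j h1 h2 h3 =>
          (hno _ (hcand j h1 h2 h3)) (by show (k : Int) < ((j : Int)); exact_mod_cast h1))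
      rw [hbnone]
      simp [hk]
    | some q =>
      obtain ⟨hqmem, hqlt, hqmin⟩ := pvNxt_eq_some _ _ q hsuffpw hnx
      obtain ⟨mb, hrq, hkmb, hmbn, hcmb⟩ := hmemcand q hqmem hqlt
      cases hb : pvBest A (k : Int) with
      | none => exact absurd hcmb (((pvBest_char A k hk).1.mp hb) mb hkmb hmbn)
      | some b =>
        obtain ⟨bb, rfl, hkbb, hbbn, hcbb, hbmin⟩ := (pvBest_char A k hk).2 b hb
        have hrb := hcand bb hkbb hbbn hcbb
        have h1 := hqmin _ hrb (by show (k : Int) < ((bb : Int)); exact_mod_cast hkbb)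
        have h2 := hbmin mb hkmb hmbn hcmb
        subst hrq
        simp only
        rcases h1 with h1 | h1
        · rw [Prod.mk.injEq] at h1
          rw [h1.2]
        · exfalso
          unfold pvLtP at h1
          simp only at h1
          omega
  · rw [if_neg (fun h => hk ((hmem k).mp h))]
    have h1 : (List.replicate A.length (-1 : Int))[k]? = none := by
      rw [List.getElem?_eq_none]
      · rw [List.length_replicate]; omega
    have h2 : (v2_adv_alt A)[k]? = none := by
      rw [List.getElem?_eq_none]
      unfold v2_adv_alt
      rw [List.length_map, PySem.List.length_pyRange_one]
      omega
    rw [h1, h2]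


-- ===== VERDICT (by name: the statement is the Claim_ definition above) =====
theorem v2_adv_spec : Claim_equal_v2_adv := by
  intro A _
  unfold Spec_v2_adv
  exact List.ext_getElem? (fun k => pvPointwise A k)
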